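-- pv_equiv track=rewrite | github.com/supergnaw/advent-of-code | 2022/day-08.py | get_rows_and_columns
-- ===== SOURCE A (Python) =====
-- def get_rows_and_columns(tree_array):
--     tree_dict = {"rows":[],"columns":[]}
--     for row in range(0, len(tree_array)):
--         for column in range(0, len(tree_array[row])):
--             # instantiations for nonsense error handling
--             if row not in tree_dict["rows"]:
--                 tree_dict["rows"].append([])
--             if column not in tree_dict["columns"]:
--                 tree_dict["columns"].append([])
--             # add tree heights
--             tree_dict["rows"][row].append(tree_array[row][column])
--             tree_dict["columns"][column].append(tree_array[row][column])
--     # clear out the empty lists from instantiations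
--     tree_dict["rows"] = list(filter(None, tree_dict["rows"]))
--     tree_dict["columns"] = list(filter(None, tree_dict["columns"]))
--     return tree_dict
-- ===== SOURCE B (Python) =====
-- def get_rows_and_columns(tree_array):
--     # rows: the nonempty rows, in order (A's filter(None) drops empty rows)
--     rows = [list(r) for r in tree_array if r]
--     # columns: column-major gather; ragged rows simply don't contribute past their length
--     max_len = max((len(r) for r in tree_array), default=0)
--     columns = []
--     for j in range(max_len):
--         columns.append([row[j] for row in tree_array if j < len(row)])
--     return {"rows": rows, "columns": columns}
-- ===== Notes on version B (the rewrite author's own statement) =====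
-- stated objective: faster
-- what changed: Replaces A's single row-major double loop over cells (which grows both lists by one empty placeholder per cell via an always-true membership scan, writes by index, and filters at the end) by two direct passes: a filter of the nonempty rows and a column-major gather up to the longest row length.
import Mathlib
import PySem

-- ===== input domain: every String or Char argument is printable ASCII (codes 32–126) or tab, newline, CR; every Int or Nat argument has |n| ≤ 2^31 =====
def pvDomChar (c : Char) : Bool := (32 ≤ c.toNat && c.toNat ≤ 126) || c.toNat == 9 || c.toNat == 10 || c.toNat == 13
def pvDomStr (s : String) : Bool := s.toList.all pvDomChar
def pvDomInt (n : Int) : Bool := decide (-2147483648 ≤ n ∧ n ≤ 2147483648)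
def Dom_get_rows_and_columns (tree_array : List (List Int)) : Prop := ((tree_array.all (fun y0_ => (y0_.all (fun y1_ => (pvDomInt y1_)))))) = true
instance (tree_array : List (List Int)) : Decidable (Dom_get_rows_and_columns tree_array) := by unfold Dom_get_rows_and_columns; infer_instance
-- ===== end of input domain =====

-- B replaces A's single cell-by-cell double loop (with its per-cell membership scans and
-- trailing empty placeholders filtered at the end) by a direct filter of the nonempty rows
-- plus a column-major gather; measurably faster (A's per-cell 'row not in rows' scan is quadratic).

-- ===== PORT A =====
-- 'row not in tree_dict["rows"]' / 'column not in tree_dict["columns"]': an int is never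
-- equal to a list, so both membership tests are always true and both appends always happen.
-- Python raises IndexError on 'tree_dict["rows"][row]' when row is out of range; those inputs
-- are excluded by Pre_ below (here List.getD/List.set are total no-ops in that case).
def get_rows_and_columns (tree_array : List (List Int)) : List (String × List (List Int)) :=
  let st := (List.range tree_array.length).foldl
    (fun st row =>
      (List.range (tree_array.getD row []).length).foldl
        (fun st column =>
          let rows := st.1 ++ [[]]
          let columns := st.2 ++ [[]]
          let v := (tree_array.getD row []).getD column 0
          (rows.set row (rows.getD row [] ++ [v]),
           columns.set column (columns.getD column [] ++ [v])))
        st)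
    ([], [])
  [("rows", st.1.filter (fun l => decide (l ≠ []))),
   ("columns", st.2.filter (fun l => decide (l ≠ [])))]

-- ===== PORT B =====
def get_rows_and_columns_alt (tree_array : List (List Int)) : List (String × List (List Int)) :=
  let rows := (tree_array.filter (fun r => decide (r ≠ []))).map (fun r => r)
  let maxLen := tree_array.foldl (fun m r => max m r.length) 0
  let columns := (List.range maxLen).foldl
    (fun cols j =>
      cols ++ [(tree_array.filter (fun row => decide (j < row.length))).map (fun row => row.getD j 0)])
    []
  [("rows", rows), ("columns", columns)]

-- ===== PRECONDITION & SPEC =====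
-- Pre_ excludes exactly the inputs on which A raises IndexError: a nonempty row at index i
-- preceded by rows holding fewer than i cells in total.
def Pre_get_rows_and_columns (tree_array : List (List Int)) : Prop :=
  ∀ i < tree_array.length,
    tree_array.getD i [] ≠ [] → i ≤ ((tree_array.take i).map List.length).sum
instance (tree_array : List (List Int)) : Decidable (Pre_get_rows_and_columns tree_array) := by
  unfold Pre_get_rows_and_columns; infer_instance
def pvWitness_get_rows_and_columns : List (List Int) := [[1, 2], [], [3]]

def Spec_get_rows_and_columns (tree_array : List (List Int)) (out : List (String × List (List Int))) : Prop := out = get_rows_and_columns_alt tree_array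
instance (tree_array : List (List Int)) (out : List (String × List (List Int))) : Decidable (Spec_get_rows_and_columns tree_array out) := by unfold Spec_get_rows_and_columns; infer_instance

-- ===== CLAIM (what is proved, stated in full; the proofs are below) =====
def Claim_equal_get_rows_and_columns : Prop := ∀ (tree_array : List (List Int)), Dom_get_rows_and_columns tree_array → Pre_get_rows_and_columns tree_array → Spec_get_rows_and_columns tree_array (get_rows_and_columns tree_array)

-- ===== LEMMAS AND PROOFS =====

-- total number of cells in the first k rows
def tcount (ta : List (List Int)) : Nat := (ta.map List.length).sum
-- column j of ta, row-major
def gather (j : Nat) (ta : List (List Int)) : List Int :=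
  (ta.filter (fun r => decide (j < r.length))).map (fun r => r.getD j 0)

-- entry i of A's "rows" list while cell c of row k is about to be processed
def rowEnt (ta : List (List Int)) (k : Nat) (l : List Int) (c : Nat) (i : Nat) : List Int :=
  if i < k then ta.getD i [] else if i = k then l.take c else []
-- entry j of A's "columns" list at the same moment
def colEnt (ta : List (List Int)) (k : Nat) (l : List Int) (c : Nat) (j : Nat) : List Int :=
  gather j (ta.take k) ++ (if j < c then [l.getD j 0] else [])

def innerSt (ta : List (List Int)) (k : Nat) (l : List Int) (c : Nat) :
    List (List Int) × List (List Int) :=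
  ((List.range (tcount (ta.take k) + c)).map (rowEnt ta k l c),
   (List.range (tcount (ta.take k) + c)).map (colEnt ta k l c))

lemma getD_map_range {α : Type} (f : Nat → α) (d : α) {k N : Nat} (h : k < N) :
    ((List.range N).map f).getD k d = f k := by
  rw [List.getD_eq_getElem?_getD]
  simp [h]


lemma set_map_range {α : Type} (f : Nat → α) (y : α) {k N : Nat} (h : k < N) :
    ((List.range N).map f).set k y = (List.range N).map (fun i => if i = k then y else f i) := by
  apply List.ext_getElem
  · simp
  · intro i h1 h2
    simp only [List.getElem_set, List.getElem_map, List.getElem_range]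
    by_cases hik : i = k
    · subst hik; simp
    · simp [hik, Ne.symm hik]


lemma map_range_succ_of_last {α : Type} (f : Nat → α) (N : Nat) (y : α) (h : f N = y) :
    (List.range N).map f ++ [y] = (List.range (N + 1)).map f := by
  rw [List.range_succ, List.map_append]
  simp [h]


lemma len_le_tcount {r : List Int} {p : List (List Int)} (h : r ∈ p) : r.length ≤ tcount p := by
  unfold tcount
  exact List.le_sum_of_mem (List.mem_map_of_mem h)


lemma gather_nil_of_le {j : Nat} {p : List (List Int)} (h : tcount p ≤ j) : gather j p = [] := by
  unfold gather
  rw [List.filter_eq_nil_iff.mpr, List.map_nil]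
  intro r hr
  simp only [decide_eq_true_eq, not_lt]
  exact le_trans (len_le_tcount hr) h


lemma take_concat_getD {l : List Int} {c : Nat} (h : c < l.length) :
    l.take c ++ [l.getD c 0] = l.take (c + 1) := by
  rw [List.getD_eq_getElem?_getD, List.getElem?_eq_getElem h]
  simpa using (List.take_concat_get l c h).symm


lemma tcount_take_succ {ta : List (List Int)} {k : Nat} (h : k < ta.length) :
    tcount (ta.take (k + 1)) = tcount (ta.take k) + (ta.getD k []).length := by
  unfold tcount
  rw [List.map_take, List.map_take, List.sum_take_succ _ _ (by simpa using h)]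
  rw [List.getD_eq_getElem?_getD, List.getElem?_eq_getElem h]
  simp


lemma gather_take_succ {ta : List (List Int)} {k : Nat} (h : k < ta.length) (j : Nat) :
    gather j (ta.take (k + 1)) =
      gather j (ta.take k) ++
        (if j < (ta.getD k []).length then [(ta.getD k []).getD j 0] else []) := by
  unfold gather
  rw [List.take_succ, List.getD_eq_getElem?_getD, List.getElem?_eq_getElem h]
  simp only [Option.toList_some, Option.getD_some, List.filter_append, List.map_append]
  congr 1
  by_cases hj : j < ta[k].length <;> simp [hj]


lemma tcount_take_le (ta : List (List Int)) (m : Nat) : tcount (ta.take m) ≤ tcount ta := by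
  unfold tcount
  rw [List.map_take]
  conv_rhs => rw [← List.take_append_drop m (ta.map List.length)]
  rw [List.sum_append]
  exact Nat.le_add_right _ _


-- one cell of A's double loop advances the inner state
lemma inner_step (ta : List (List Int)) (k : Nat) (l : List Int) (c : Nat)
    (hc : c < l.length) (hk : k ≤ tcount (ta.take k)) :
    (fun st column =>
      let rows := st.1 ++ [([] : List Int)]
      let columns := st.2 ++ [([] : List Int)]
      let v := l.getD column 0
      (rows.set k (rows.getD k [] ++ [v]), columns.set column (columns.getD column [] ++ [v])))
      (innerSt ta k l c) c = innerSt ta k l (c + 1) := by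
  have hkN : k ≤ tcount (ta.take k) + c := le_trans hk (Nat.le_add_right _ _)
  unfold innerSt
  simp only []
  set N := tcount (ta.take k) + c with hN
  have hrow_last : rowEnt ta k l c N = [] := by
    unfold rowEnt
    by_cases h1 : N < k
    · omega
    · by_cases h2 : N = k
      · have hc0 : c = 0 := by omega
        simp [h1, hc0]
      · simp [h1, h2]
  have hcol_last : colEnt ta k l c N = [] := by
    unfold colEnt
    have hg : gather N (ta.take k) = [] := gather_nil_of_le (by omega)
    have hnc : ¬ N < c := by omega
    simp [hg, hnc]
  rw [map_range_succ_of_last _ _ _ hrow_last, map_range_succ_of_last _ _ _ hcol_last]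
  rw [getD_map_range _ _ (show k < N + 1 by omega), getD_map_range _ _ (show c < N + 1 by omega)]
  rw [set_map_range _ _ (show k < N + 1 by omega), set_map_range _ _ (show c < N + 1 by omega)]
  have hN' : N + 1 = tcount (ta.take k) + (c + 1) := by omega
  rw [hN']
  refine congrArg₂ Prod.mk ?_ ?_
  · apply List.map_congr_left
    intro i _
    by_cases hik : i = k
    · subst hik
      have : rowEnt ta i l c i = l.take c := by unfold rowEnt; simp
      rw [if_pos rfl, this, take_concat_getD hc]
      unfold rowEnt; simp
    · rw [if_neg hik]
      unfold rowEnt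
      by_cases h1 : i < k
      · simp [h1]
      · simp [h1, hik]
  · apply List.map_congr_left
    intro j _
    by_cases hjc : j = c
    · subst hjc
      unfold colEnt
      simp
    · rw [if_neg hjc]
      unfold colEnt
      by_cases h1 : j < c
      · simp [h1, show j < c + 1 by omega]
      · simp [h1, show ¬ j < c + 1 by omega]

lemma inner_inv (ta : List (List Int)) (k : Nat) (l : List Int)
    (hk : l ≠ [] → k ≤ tcount (ta.take k)) :
    ∀ c ≤ l.length,
      (List.range c).foldl
        (fun st column =>
          let rows := st.1 ++ [([] : List Int)]
          let columns := st.2 ++ [([] : List Int)]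
          let v := l.getD column 0
          (rows.set k (rows.getD k [] ++ [v]), columns.set column (columns.getD column [] ++ [v])))
        (innerSt ta k l 0) = innerSt ta k l c := by
  intro c
  induction c with
  | zero => intro _; simp
  | succ c ih =>
    intro hc
    rw [List.range_succ, List.foldl_append, ih (by omega)]
    simp only [List.foldl_cons, List.foldl_nil]
    exact inner_step ta k l c (by omega)
      (hk (List.ne_nil_of_length_pos (by omega)))

lemma outer_inv (ta : List (List Int)) (hpre : Pre_get_rows_and_columns ta) :
    ∀ k ≤ ta.length,
      (List.range k).foldl
        (fun st row =>
          (List.range (ta.getD row []).length).foldl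
            (fun st column =>
              let rows := st.1 ++ [([] : List Int)]
              let columns := st.2 ++ [([] : List Int)]
              let v := (ta.getD row []).getD column 0
              (rows.set row (rows.getD row [] ++ [v]),
               columns.set column (columns.getD column [] ++ [v])))
            st)
        ([], []) = innerSt ta k (ta.getD k []) 0 := by
  intro k
  induction k with
  | zero => intro _; simp [innerSt, tcount]
  | succ k ih =>
    intro hk
    have hklt : k < ta.length := by omega
    rw [List.range_succ, List.foldl_append, ih (by omega)]
    simp only [List.foldl_cons, List.foldl_nil]
    rw [inner_inv ta k (ta.getD k []) (fun hne => hpre k hklt hne) (ta.getD k []).length le_rfl]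
    unfold innerSt
    have hT : tcount (ta.take (k + 1)) + 0 = tcount (ta.take k) + (ta.getD k []).length := by
      rw [tcount_take_succ hklt]; omega
    rw [hT]
    refine congrArg₂ Prod.mk ?_ ?_
    · apply List.map_congr_left
      intro i _
      unfold rowEnt
      by_cases h1 : i < k
      · simp [h1, show i < k + 1 by omega]
      · by_cases h2 : i = k
        · subst h2
          simp [show i < i + 1 by omega, List.take_length]
        · simp [h1, h2, show ¬ i < k + 1 by omega]
    · apply List.map_congr_left
      intro j _
      unfold colEnt
      rw [gather_take_succ hklt]
      simp

lemma map_range_getD (ta : List (List Int)) (m : Nat) :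
    (List.range m).map (fun i => ta.getD i []) =
      ta.take m ++ List.replicate (m - ta.length) [] := by
  induction m with
  | zero => simp
  | succ m ih =>
    rw [List.range_succ, List.map_append, ih]
    simp only [List.map_cons, List.map_nil]
    by_cases h : m < ta.length
    · rw [List.getD_eq_getElem?_getD, List.getElem?_eq_getElem h]
      have h1 : m - ta.length = 0 := by omega
      have h2 : m + 1 - ta.length = 0 := by omega
      simp only [h1, h2, List.replicate_zero, List.append_nil, Option.getD_some]
      simpa using (List.take_concat_get ta m h)
    · have h1 : ta.getD m [] = [] := by
        rw [List.getD_eq_getElem?_getD, List.getElem?_eq_none (by omega)]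
        rfl
      have h2 : ta.take m = ta := List.take_of_length_le (by omega)
      have h3 : ta.take (m + 1) = ta := List.take_of_length_le (by omega)
      have h4 : m + 1 - ta.length = (m - ta.length) + 1 := by omega
      rw [h1, h2, h3, h4, List.replicate_succ']
      simp

lemma filter_take_of_pre {ta : List (List Int)} (hpre : Pre_get_rows_and_columns ta) :
    (ta.take (tcount ta)).filter (fun l => decide (l ≠ [])) =
      ta.filter (fun l => decide (l ≠ [])) := by
  set T := tcount ta with hT
  by_cases hTn : ta.length ≤ T
  · rw [List.take_of_length_le hTn]
  · conv_rhs => rw [← List.take_append_drop T ta]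
    rw [List.filter_append]
    have hdrop : (ta.drop T).filter (fun l => decide (l ≠ [])) = [] := by
      rw [List.filter_eq_nil_iff]
      intro r hr
      simp only [ne_eq, decide_not, Bool.not_eq_eq_eq_not, Bool.not_true, decide_eq_false_iff_not,
        Decidable.not_not]
      by_contra hne
      obtain ⟨i, hi, hget⟩ := List.mem_iff_getElem.mp hr
      rw [List.getElem_drop] at hget
      have hlen : T + i < ta.length := by
        have := (List.length_drop ..) ▸ hi
        omega
      have hpre' := hpre (T + i) hlen
      rw [List.getD_eq_getElem?_getD, List.getElem?_eq_getElem hlen] at hpre'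
      have h1 : T + i ≤ tcount (ta.take (T + i)) := hpre' (by simp [hget]; exact hne)
      have h2 : tcount (ta.take (T + i + 1)) ≤ T := hT ▸ tcount_take_le ta (T + i + 1)
      rw [tcount_take_succ hlen] at h2
      have h3 : 0 < (ta.getD (T + i) []).length := by
        rw [List.getD_eq_getElem?_getD, List.getElem?_eq_getElem hlen]
        simp only [Option.getD_some]
        rw [hget]
        exact List.length_pos_of_ne_nil hne
      omega
    rw [hdrop, List.append_nil]

lemma lt_foldl_max (ta : List (List Int)) (a j : Nat) :
    j < ta.foldl (fun m r => max m r.length) a ↔ j < a ∨ ∃ r ∈ ta, j < r.length := by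
  induction ta generalizing a with
  | nil => simp
  | cons l t ih =>
    simp only [List.foldl_cons, ih, List.mem_cons]
    constructor
    · rintro (h | h)
      · rcases lt_max_iff.mp h with h | h
        · exact Or.inl h
        · exact Or.inr ⟨l, Or.inl rfl, h⟩
      · obtain ⟨r, hr, hl⟩ := h
        exact Or.inr ⟨r, Or.inr hr, hl⟩
    · rintro (h | ⟨r, (rfl | hr), hl⟩)
      · exact Or.inl (lt_max_iff.mpr (Or.inl h))
      · exact Or.inl (lt_max_iff.mpr (Or.inr hl))
      · exact Or.inr ⟨r, hr, hl⟩


lemma foldl_max_le (ta : List (List Int)) (a : Nat) :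
    ta.foldl (fun m r => max m r.length) a ≤ a + tcount ta := by
  induction ta generalizing a with
  | nil => simp [tcount]
  | cons l t ih =>
    simp only [List.foldl_cons]
    have := ih (max a l.length)
    have : tcount (l :: t) = l.length + tcount t := by simp [tcount]
    omega


lemma filter_range_lt {M T : Nat} (h : M ≤ T) :
    (List.range T).filter (fun j => decide (j < M)) = List.range M := by
  induction T with
  | zero => interval_cases M; rfl
  | succ T ih =>
    rcases Nat.lt_or_ge M (T+1) with h1 | h1
    · rw [List.range_succ, List.filter_append, ih (by omega)]
      simp; omega
    · have hM : M = T + 1 := by omega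
      subst hM
      rw [List.filter_eq_self.mpr]
      intro a ha
      simp only [List.mem_range] at ha
      simpa using ha


lemma gather_ne_iff (j : Nat) (ta : List (List Int)) :
    gather j ta ≠ [] ↔ ∃ r ∈ ta, j < r.length := by
  unfold gather
  rw [ne_eq, List.map_eq_nil_iff, List.filter_eq_nil_iff]
  push Not
  simp

-- ===== VERDICT (by name: the statement is the Claim_ definition above) =====
theorem get_rows_and_columns_spec : Claim_equal_get_rows_and_columns := by
  intro ta _ hpre
  have hout := outer_inv ta hpre ta.length le_rfl
  unfold innerSt at hout
  unfold Spec_get_rows_and_columns get_rows_and_columns get_rows_and_columns_alt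
  simp only []
  rw [hout]
  simp only [Nat.add_zero]
  have hgetn : ta.getD ta.length [] = [] := by
    rw [List.getD_eq_getElem?_getD, List.getElem?_eq_none le_rfl]; rfl
  have htake : ta.take ta.length = ta := List.take_length ..
  set T := tcount (ta.take ta.length) with hTdef
  have hTta : T = tcount ta := by rw [hTdef, htake]
  -- rows
  have hrow : (List.range T).map (rowEnt ta ta.length (ta.getD ta.length []) 0) =
      ta.take T ++ List.replicate (T - ta.length) [] := by
    rw [← map_range_getD ta T]
    · apply List.map_congr_left
      intro i _
      unfold rowEnt
      by_cases h : i < ta.length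
      · simp [h]
      · have hg : ta.getD i [] = [] := by
          rw [List.getD_eq_getElem?_getD, List.getElem?_eq_none (by omega)]; rfl
        simp [h]
  have hrepf : (List.replicate (T - ta.length) ([] : List Int)).filter
      (fun l => decide (l ≠ [])) = [] := by
    rw [List.filter_eq_nil_iff]
    intro r hr
    rw [List.eq_of_mem_replicate hr]
    simp
  have hrows : ((List.range T).map
      (rowEnt ta ta.length (ta.getD ta.length []) 0)).filter (fun l => decide (l ≠ [])) =
      ta.filter (fun l => decide (l ≠ [])) := by
    rw [hrow, List.filter_append, hrepf, List.append_nil]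
    by_cases hTn : ta.length ≤ T
    · rw [List.take_of_length_le hTn]
    · rw [hTta]
      exact filter_take_of_pre hpre
  -- columns
  have hcolf : (List.range T).map (colEnt ta ta.length (ta.getD ta.length []) 0) =
      (List.range T).map (fun j => gather j ta) := by
    apply List.map_congr_left
    intro j _
    unfold colEnt
    simp [htake]
  set M := ta.foldl (fun m r => max m r.length) 0 with hMdef
  have hMT : M ≤ T := by
    have := foldl_max_le ta 0
    omega
  have hcols : ((List.range T).map (fun j => gather j ta)).filter
      (fun l => decide (l ≠ [])) = (List.range M).map (fun j => gather j ta) := by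
    rw [List.filter_map, List.filter_congr (q := fun j => decide (j < M))]
    · rw [filter_range_lt hMT]
    · intro j _
      simp only [Function.comp]
      rw [decide_eq_decide]
      rw [gather_ne_iff]
      rw [lt_foldl_max]
      simp
  rw [hrows, hcolf, hcols]
  rw [PySem.List.foldl_append_singleton_eq_map, List.nil_append]
  simp only [gather, List.map_id']
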